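-- pv_equiv track=rewrite | github.com/sivasickiy2011-droid/pixel59rev1 | backend/news-admin/index.py | translate_month
-- ===== SOURCE A (Python) =====
-- def translate_month(date_str: str) -> str:
--     months = {
--         'January': 'января', 'February': 'февраля', 'March': 'марта',
--         'April': 'апреля', 'May': 'мая', 'June': 'июня',
--         'July': 'июля', 'August': 'августа', 'September': 'сентября',
--         'October': 'октября', 'November': 'ноября', 'December': 'декабря'
--     }
--     for eng, rus in months.items():
--         date_str = date_str.replace(eng, rus)
--     return date_str
-- ===== SOURCE B (Python) =====
-- MONTH_PAIRS = [
--     ('January', 'января'), ('February', 'февраля'), ('March', 'марта'),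
--     ('April', 'апреля'), ('May', 'мая'), ('June', 'июня'),
--     ('July', 'июля'), ('August', 'августа'), ('September', 'сентября'),
--     ('October', 'октября'), ('November', 'ноября'), ('December', 'декабря'),
-- ]
--
--
-- def translate_month(date_str: str) -> str:
--     out = []
--     i = 0
--     n = len(date_str)
--     while i < n:
--         for eng, rus in MONTH_PAIRS:
--             if date_str.startswith(eng, i):
--                 out.append(rus)
--                 i += len(eng)
--                 break
--         else:
--             out.append(date_str[i])
--             i += 1
--     return ''.join(out)
-- ===== Notes on version B (the rewrite author's own statement) =====
-- stated objective: alternative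
-- what changed: A rewrites the whole string twelve times, one str.replace pass per month; B makes a single left-to-right scan that at each position emits the first matching month's Russian translation (or copies the character), so the string is traversed once.
import Mathlib
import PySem

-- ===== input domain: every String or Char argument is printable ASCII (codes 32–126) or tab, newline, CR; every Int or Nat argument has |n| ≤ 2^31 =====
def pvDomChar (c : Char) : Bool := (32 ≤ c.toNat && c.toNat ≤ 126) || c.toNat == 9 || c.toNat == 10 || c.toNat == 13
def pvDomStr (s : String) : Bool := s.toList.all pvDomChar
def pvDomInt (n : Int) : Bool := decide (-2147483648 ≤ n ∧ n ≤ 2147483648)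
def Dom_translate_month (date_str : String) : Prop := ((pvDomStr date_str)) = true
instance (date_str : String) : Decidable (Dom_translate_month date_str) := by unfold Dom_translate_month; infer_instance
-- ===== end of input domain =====

-- B replaces A's twelve sequential whole-string .replace passes by one left-to-right scan that
-- substitutes the first month name matching at each position (objective: alternative decomposition; same result).

-- ===== PORT A =====
def monthsA : List (String × String) :=
  [("January", "января"), ("February", "февраля"), ("March", "марта"),
   ("April", "апреля"), ("May", "мая"), ("June", "июня"),
   ("July", "июля"), ("August", "августа"), ("September", "сентября"),
   ("October", "октября"), ("November", "ноября"), ("December", "декабря")]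

def translate_month (date_str : String) : String :=
  monthsA.foldl (fun s p => PySem.Str.replace s p.1 p.2) date_str

-- ===== PORT B =====
def monthsScan : List (List Char × List Char) :=
  [(['J', 'a', 'n', 'u', 'a', 'r', 'y'], ['я', 'н', 'в', 'а', 'р', 'я']),
   (['F', 'e', 'b', 'r', 'u', 'a', 'r', 'y'], ['ф', 'е', 'в', 'р', 'а', 'л', 'я']),
   (['M', 'a', 'r', 'c', 'h'], ['м', 'а', 'р', 'т', 'а']),
   (['A', 'p', 'r', 'i', 'l'], ['а', 'п', 'р', 'е', 'л', 'я']),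
   (['M', 'a', 'y'], ['м', 'а', 'я']),
   (['J', 'u', 'n', 'e'], ['и', 'ю', 'н', 'я']),
   (['J', 'u', 'l', 'y'], ['и', 'ю', 'л', 'я']),
   (['A', 'u', 'g', 'u', 's', 't'], ['а', 'в', 'г', 'у', 'с', 'т', 'а']),
   (['S', 'e', 'p', 't', 'e', 'm', 'b', 'e', 'r'], ['с', 'е', 'н', 'т', 'я', 'б', 'р', 'я']),
   (['O', 'c', 't', 'o', 'b', 'e', 'r'], ['о', 'к', 'т', 'я', 'б', 'р', 'я']),
   (['N', 'o', 'v', 'e', 'm', 'b', 'e', 'r'], ['н', 'о', 'я', 'б', 'р', 'я']),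
   (['D', 'e', 'c', 'e', 'm', 'b', 'e', 'r'], ['д', 'е', 'к', 'а', 'б', 'р', 'я'])]

def scanGo : List Char → List Char
  | [] => []
  | c :: t =>
    match monthsScan.find? (fun p => p.1.isPrefixOf (c :: t)) with
    | some p => p.2 ++ scanGo (t.drop (p.1.length - 1))
    | none => c :: scanGo t
termination_by s => s.length
decreasing_by
  · simp only [List.length_cons]
    have : (List.drop (p.1.length - 1) t).length = t.length - (p.1.length - 1) := List.length_drop
    omega
  · simp

def translate_month_alt (date_str : String) : String :=
  String.ofList (scanGo date_str.toList)

-- ===== PRECONDITION & SPEC =====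
def Spec_translate_month (date_str : String) (out : String) : Prop := out = translate_month_alt date_str
instance (date_str : String) (out : String) : Decidable (Spec_translate_month date_str out) := by unfold Spec_translate_month; infer_instance

-- ===== CLAIM (what is proved, stated in full; the proofs are below) =====
def Claim_equal_translate_month : Prop := ∀ (date_str : String), Dom_translate_month date_str → Spec_translate_month date_str (translate_month date_str)

-- ===== LEMMAS AND PROOFS =====

-- structural form of Python's str.replace for a nonempty pattern (proof-side only)
def repl (old new : List Char) : List Char → List Char
  | [] => []
  | c :: t =>
    if old.isPrefixOf (c :: t) then new ++ repl old new (t.drop (old.length - 1))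
    else c :: repl old new t
termination_by s => s.length
decreasing_by
  · simp only [List.length_cons]
    have : (List.drop (old.length - 1) t).length = t.length - (old.length - 1) := List.length_drop
    omega
  · simp

theorem go_eq_repl (fuel : Nat) : ∀ (l acc old new : List Char), old ≠ [] → l.length ≤ fuel →
    PySem.Chars.replace.go old new fuel l acc = acc.reverse ++ repl old new l := by
  induction fuel with
  | zero =>
    intro l acc old new h hl
    have hnil : l = [] := List.eq_nil_of_length_eq_zero (Nat.le_zero.mp hl)
    subst hnil
    rw [PySem.Chars.replace.go.eq_def]
    simp [repl]
  | succ n ih =>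
    intro l acc old new h hl
    cases l with
    | nil =>
      rw [PySem.Chars.replace.go.eq_def]
      simp [repl]
    | cons c t =>
      rw [PySem.Chars.replace.go.eq_def]
      simp only []
      by_cases hp : old.isPrefixOf (c :: t)
      · rw [if_pos hp]
        have hlen : old.length ≥ 1 := by
          cases old with
          | nil => exact absurd rfl h
          | cons _ _ => simp
        have hdrop : List.drop old.length (c :: t) = t.drop (old.length - 1) := by
          cases old with
          | nil => exact absurd rfl h
          | cons x o => simp
        have hl2 : (List.drop old.length (c :: t)).length ≤ n := by
          have : (List.drop old.length (c :: t)).length = (c :: t).length - old.length := List.length_drop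
          simp only [List.length_cons] at hl this
          omega
        rw [ih _ _ _ _ h hl2, hdrop]
        rw [repl]
        rw [if_pos hp]
        simp
      · rw [if_neg hp]
        have hl2 : t.length ≤ n := by simp only [List.length_cons] at hl; omega
        rw [ih _ _ _ _ h hl2]
        rw [repl]
        rw [if_neg hp]
        simp

theorem replace_eq_repl (s old new : List Char) (h : old ≠ []) :
    PySem.Chars.replace s old new = repl old new s := by
  rw [PySem.Chars.replace]
  rw [if_neg (by simpa [List.isEmpty_iff] using h)]
  simpa using go_eq_repl s.length s [] old new h (le_refl _)

theorem repl_append_of_head_notMem (p q a : List Char) (hp : p ≠ [])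
    (h : ∀ c ∈ a, p.head? ≠ some c) (u : List Char) :
    repl p q (a ++ u) = a ++ repl p q u := by
  induction a with
  | nil => simp
  | cons x a' ih =>
    have hnp : ¬ p.isPrefixOf (x :: (a' ++ u)) := by
      intro hpre
      rw [List.isPrefixOf_iff_prefix] at hpre
      cases p with
      | nil => exact hp rfl
      | cons ph pt =>
        obtain ⟨w, hw⟩ := hpre
        simp only [List.cons_append, List.cons.injEq] at hw
        exact h x (List.mem_cons_self) (by simp [hw.1])
    rw [List.cons_append, repl, if_neg hnp]
    rw [ih (fun c hc => h c (List.mem_cons_of_mem _ hc))]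
    simp

theorem repl_append_month (p q e : List Char) (hp : p ≠ [])
    (hne1 : ¬ p <+: e) (hne2 : ¬ e <+: p)
    (htail : ∀ c ∈ e.tail, p.head? ≠ some c) (u : List Char) :
    repl p q (e ++ u) = e ++ repl p q u := by
  cases e with
  | nil => simp
  | cons x e' =>
    have hnp : ¬ p.isPrefixOf (x :: e' ++ u) := by
      intro hpre
      rw [List.isPrefixOf_iff_prefix] at hpre
      rcases List.prefix_or_prefix_of_prefix hpre (List.prefix_append _ u) with h1 | h1
      · exact hne1 h1
      · exact hne2 h1
    simp only [List.cons_append] at hnp ⊢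
    rw [repl, if_neg hnp]
    rw [repl_append_of_head_notMem p q e' hp (by simpa using htail) u]

theorem repl_self_append (e r : List Char) (he : e ≠ []) (u : List Char) :
    repl e r (e ++ u) = r ++ repl e r u := by
  cases e with
  | nil => exact absurd rfl he
  | cons x e' =>
    have hpre : (x :: e').isPrefixOf (x :: e' ++ u) := by
      rw [List.isPrefixOf_iff_prefix]
      exact List.prefix_append _ _
    simp only [List.cons_append] at hpre ⊢
    rw [repl, if_pos hpre]
    congr 1
    have : (x :: e').length - 1 = e'.length := by simp
    rw [this, List.drop_left]

theorem not_prefix_repl (n : Nat) : ∀ (t m old new : List Char), t.length ≤ n → m ≠ [] → new ≠ [] →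
    (∀ c ∈ m, ∀ c' ∈ new, c ≠ c') →
    ¬ m <+: t → ¬ m <+: repl old new t := by
  induction n with
  | zero =>
    intro t m old new hl hm _ _ hpre
    have : t = [] := List.eq_nil_of_length_eq_zero (Nat.le_zero.mp hl)
    subst this
    simpa [repl] using hpre
  | succ n ih =>
    intro t m old new hl hm hn hdisj hpre
    cases t with
    | nil => simpa [repl] using hpre
    | cons x t' =>
      rw [repl]
      by_cases hp : old.isPrefixOf (x :: t')
      · rw [if_pos hp]
        cases m with
        | nil => exact absurd rfl hm
        | cons mh mt =>
          cases hnew : new with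
          | nil => exact absurd hnew hn
          | cons nh nt =>
            subst hnew
            intro hcon
            obtain ⟨w, hw⟩ := hcon
            simp only [List.cons_append, List.cons.injEq] at hw
            exact hdisj mh List.mem_cons_self nh List.mem_cons_self hw.1
      · rw [if_neg hp]
        cases m with
        | nil => exact absurd rfl hm
        | cons mh mt =>
          intro hcon
          obtain ⟨w, hw⟩ := hcon
          simp only [List.cons_append, List.cons.injEq] at hw
          -- hw : mh = x ∧ mt ++ w = repl old new t'
          have hmh : mh = x := hw.1
          have hmt : mt <+: repl old new t' := ⟨w, hw.2⟩
          by_cases hmtnil : mt = []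
          · subst hmtnil
            exact hpre ⟨t', by simp [hmh]⟩
          · have hnt : ¬ mt <+: t' := by
              intro h2
              exact hpre (by rw [hmh]; exact List.cons_prefix_cons.mpr ⟨rfl, h2⟩)
            exact ih t' mt old new (by simp at hl; omega) hmtnil hn
              (fun c hc c' hc' => hdisj c (List.mem_cons_of_mem _ hc) c' hc') hnt hmt

def chainStep (s : List Char) (p : List Char × List Char) : List Char := repl p.1 p.2 s

theorem fold_pass (L : List (List Char × List Char)) (a : List Char)
    (h : ∀ p ∈ L, ∀ u, repl p.1 p.2 (a ++ u) = a ++ repl p.1 p.2 u) :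
    ∀ u, L.foldl chainStep (a ++ u) = a ++ L.foldl chainStep u := by
  induction L with
  | nil => intro u; simp
  | cons p0 L' ih =>
    intro u
    simp only [List.foldl_cons, chainStep]
    rw [h p0 List.mem_cons_self u]
    exact ih (fun p hp => h p (List.mem_cons_of_mem _ hp)) _

theorem fold_match (L : List (List Char × List Char)) (e r : List Char)
    (hmem : (e, r) ∈ L) (he : e ≠ [])
    (hpass : ∀ p ∈ L, p ≠ (e, r) → ∀ u, repl p.1 p.2 (e ++ u) = e ++ repl p.1 p.2 u)
    (hcyr : ∀ p ∈ L, ∀ u, repl p.1 p.2 (r ++ u) = r ++ repl p.1 p.2 u) :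
    ∀ u, L.foldl chainStep (e ++ u) = r ++ L.foldl chainStep u := by
  induction L with
  | nil => cases hmem
  | cons p0 L' ih =>
    intro u
    by_cases h0 : p0 = (e, r)
    · subst h0
      simp only [List.foldl_cons, chainStep]
      rw [repl_self_append e r he u]
      exact fold_pass L' r (fun p hp => hcyr p (List.mem_cons_of_mem _ hp)) _
    · have hmem' : (e, r) ∈ L' := by
        cases hmem with
        | head => exact absurd rfl h0
        | tail _ h => exact h
      simp only [List.foldl_cons, chainStep]
      rw [hpass p0 List.mem_cons_self h0 u]
      exact ih hmem' (fun p hp => hpass p (List.mem_cons_of_mem _ hp))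
        (fun p hp => hcyr p (List.mem_cons_of_mem _ hp)) _

theorem fold_nomatch (L : List (List Char × List Char)) :
    ∀ (c : Char) (t : List Char),
    (∀ p ∈ L, p.1 ≠ [] ∧ p.2 ≠ [] ∧ (∀ ch ∈ L.flatMap (fun q => q.1), ∀ ch' ∈ p.2, ch ≠ ch')) →
    (∀ p ∈ L, ¬ p.1 <+: (c :: t)) →
    L.foldl chainStep (c :: t) = c :: L.foldl chainStep t := by
  induction L with
  | nil => intro c t _ _; simp
  | cons p0 L' ih =>
    intro c t hsh hno
    simp only [List.foldl_cons, chainStep]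
    have hstep : repl p0.1 p0.2 (c :: t) = c :: repl p0.1 p0.2 t := by
      rw [repl, if_neg]
      rw [List.isPrefixOf_iff_prefix]
      exact hno p0 List.mem_cons_self
    rw [hstep]
    have hsub : ∀ ch, ch ∈ L'.flatMap (fun q => q.1) → ch ∈ (p0 :: L').flatMap (fun q => q.1) := by
      intro ch hch
      simp only [List.mem_flatMap] at hch ⊢
      obtain ⟨q, hq, hcq⟩ := hch
      exact ⟨q, List.mem_cons_of_mem _ hq, hcq⟩
    have hsh' : ∀ p ∈ L', p.1 ≠ [] ∧ p.2 ≠ [] ∧ (∀ ch ∈ L'.flatMap (fun q => q.1), ∀ ch' ∈ p.2, ch ≠ ch') := by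
      intro p hp
      obtain ⟨h1, h2, h3⟩ := hsh p (List.mem_cons_of_mem _ hp)
      exact ⟨h1, h2, fun ch hch => h3 ch (hsub ch hch)⟩
    have hno' : ∀ p ∈ L', ¬ p.1 <+: (c :: repl p0.1 p0.2 t) := by
      intro p hp
      have hd : ∀ ch ∈ p.1, ∀ ch' ∈ p0.2, ch ≠ ch' := by
        intro ch hch ch' hch'
        refine (hsh p0 List.mem_cons_self).2.2 ch ?_ ch' hch'
        simp only [List.mem_flatMap]
        exact ⟨p, List.mem_cons_of_mem _ hp, hch⟩
      have h1 : ¬ p.1 <+: repl p0.1 p0.2 (c :: t) :=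
        not_prefix_repl (c :: t).length (c :: t) p.1 p0.1 p0.2 le_rfl
          (hsh p (List.mem_cons_of_mem _ hp)).1 (hsh p0 List.mem_cons_self).2.1 hd
          (hno p (List.mem_cons_of_mem _ hp))
      rw [hstep] at h1
      exact h1
    exact ih c (repl p0.1 p0.2 t) hsh' hno'

theorem months_ne : ∀ p ∈ monthsScan, p.1 ≠ [] ∧ p.2 ≠ [] := by decide

theorem months_disjoint : ∀ pe ∈ monthsScan, ∀ pp ∈ monthsScan, ∀ c ∈ pp.1, ∀ c' ∈ pe.2, c ≠ c' := by
  have h : (monthsScan.all fun pe => monthsScan.all fun pp => pp.1.all fun c => pe.2.all fun c' => c != c') = true := by decide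
  simp only [List.all_eq_true, bne_iff_ne] at h
  exact h

theorem months_indep : ∀ pe ∈ monthsScan, ∀ pp ∈ monthsScan, pp ≠ pe →
    ¬ pp.1 <+: pe.1 ∧ ¬ pe.1 <+: pp.1 ∧ (∀ c ∈ pe.1.tail, pp.1.head? ≠ some c) := by
  have h : (monthsScan.all fun pe => monthsScan.all fun pp =>
      (decide (pp = pe) || (!(pp.1.isPrefixOf pe.1) && !(pe.1.isPrefixOf pp.1)
        && (pe.1.tail.all fun c => pp.1.head? != some c)))) = true := by decide
  simp only [List.all_eq_true, Bool.or_eq_true, Bool.and_eq_true, decide_eq_true_eq,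
    Bool.not_eq_true', bne_iff_ne] at h
  intro pe hpe pp hpp hne
  have := h pe hpe pp hpp
  rcases this with heq | hrest
  · exact absurd heq hne
  · obtain ⟨⟨h1, h2⟩, h3⟩ : ((pp.1.isPrefixOf pe.1 = false) ∧ (pe.1.isPrefixOf pp.1 = false)) ∧ (∀ c ∈ pe.1.tail, pp.1.head? ≠ some c) := hrest
    refine ⟨?_, ?_, h3⟩
    · rw [← List.isPrefixOf_iff_prefix]; simp [h1]
    · rw [← List.isPrefixOf_iff_prefix]; simp [h2]

theorem months_pass_self (p : List Char × List Char) (hp : p ∈ monthsScan)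
    (q : List Char × List Char) (hq : q ∈ monthsScan) :
    ∀ u, repl q.1 q.2 (p.2 ++ u) = p.2 ++ repl q.1 q.2 u := by
  intro u
  apply repl_append_of_head_notMem q.1 q.2 p.2 (months_ne q hq).1
  intro c hc hhead
  have hcq : c ∈ q.1 := by
    cases hq1 : q.1 with
    | nil => simp [hq1] at hhead
    | cons a l => simp [hq1] at hhead; subst hhead; exact List.mem_cons_self
  exact months_disjoint p hp q hq c hcq c hc rfl

theorem chain_eq_scan (s : List Char) : monthsScan.foldl chainStep s = scanGo s := by
  fun_induction scanGo s with
  | case1 => simp [monthsScan, List.foldl, chainStep, repl]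
  | case2 c t pr hfind ih =>
    have hmem : pr ∈ monthsScan := List.mem_of_find?_eq_some hfind
    have hb : pr.1.isPrefixOf (c :: t) = true := by simpa using List.find?_some hfind
    have hpre : pr.1 <+: (c :: t) := List.isPrefixOf_iff_prefix.mp hb
    have hne := months_ne pr hmem
    obtain ⟨w, hw⟩ := hpre
    have hwdrop : w = t.drop (pr.1.length - 1) := by
      cases hp1 : pr.1 with
      | nil => exact absurd hp1 hne.1
      | cons x e' =>
        rw [hp1] at hw
        simp only [List.cons_append, List.cons.injEq] at hw
        rw [← hw.2]
        simp
    have hmatch : monthsScan.foldl chainStep (c :: t) = pr.2 ++ monthsScan.foldl chainStep w := by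
      rw [← hw]
      apply fold_match monthsScan pr.1 pr.2 (by simpa using hmem) hne.1
      · intro q hq hqne u
        obtain ⟨h1, h2, h3⟩ := months_indep pr hmem q hq (by simpa using hqne)
        exact repl_append_month q.1 q.2 pr.1 (months_ne q hq).1 h1 h2 h3 u
      · intro q hq u
        exact months_pass_self pr hmem q hq u
    rw [hmatch, hwdrop, ih]
  | case3 c t hfind ih =>
    have hno : ∀ q ∈ monthsScan, ¬ q.1 <+: (c :: t) := by
      intro q hq hpre
      have := List.find?_eq_none.mp hfind q hq
      simp only [Bool.not_eq_true] at this
      rw [← List.isPrefixOf_iff_prefix] at hpre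
      simp [this] at hpre
    rw [fold_nomatch monthsScan c t ?_ hno, ih]
    intro q hq
    refine ⟨(months_ne q hq).1, (months_ne q hq).2, ?_⟩
    intro ch hch ch' hch'
    simp only [List.mem_flatMap] at hch
    obtain ⟨q', hq', hchq'⟩ := hch
    exact months_disjoint q hq q' hq' ch hchq' ch' hch'

theorem strfold_toList (L : List (String × String)) (s : String) :
    (L.foldl (fun s p => PySem.Str.replace s p.1 p.2) s).toList =
    (L.map (fun p => (p.1.toList, p.2.toList))).foldl (fun l p => PySem.Chars.replace l p.1 p.2) s.toList := by
  induction L generalizing s with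
  | nil => simp
  | cons p L' ih => simp [List.foldl_cons, ih, PySem.Str.toList_replace]

theorem monthsA_toList : monthsA.map (fun p => (p.1.toList, p.2.toList)) = monthsScan := by rfl

theorem A_toList (ds : String) :
    (translate_month ds).toList = monthsScan.foldl chainStep ds.toList := by
  rw [translate_month, strfold_toList, monthsA_toList]
  apply PySem.List.foldl_congr_mem
  intro a p hp
  exact replace_eq_repl a p.1 p.2 (months_ne p hp).1

-- ===== VERDICT (by name: the statement is the Claim_ definition above) =====
theorem translate_month_spec : Claim_equal_translate_month := by
  intro ds _
  show translate_month ds = translate_month_alt ds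
  have h : (translate_month ds).toList = scanGo ds.toList := by
    rw [A_toList, chain_eq_scan]
  calc translate_month ds = String.ofList (translate_month ds).toList := String.ofList_toList.symm
    _ = translate_month_alt ds := by rw [h]; rfl
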